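-- pv_equiv track=rewrite | github.com/alpaka99/algorithm | algorithm_class/20210222_과목평가/s1.py | gardening
-- ===== SOURCE A (Python) =====
-- def gardening(N, M, garden):
--
--     # 2.1 out 할 값들
--     tree_pay = 0 # 나무의 총 가격
--     tree_cnt = 0 # 심은 나무 수
--     expensive_tree = 0 # 가장 비싼 나무의 가격
--     expensive_tree_col = 0 # 가장 비싼 나무가 심어진 열​
--     # 2.2 열고정 행순회이며, 짝수 열 인덱스의 값만 더해줘야 한다. 인덱스는 0부터 시작하기 때문!
--     # range(start,end,step)을 이용하자
--     # 열고정 행순회이기 때문에 열을 바깥 for 문에 작성한다.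
--     for i in range(0, M, 2):
--         # 행 순회를 안쪽 for문에 작성한다.
--         for j in range(N):
--             # 위에서 열의 범위 자체를 짝수인덱스 열로 처리했기때문에 tree_pay와 tree_cnt를 위해 조건문은 없다.
--             tree_pay += garden[j][i]
--             tree_cnt += 1
--             # 최대값과 그때 열의 인덱스 구하기
--             # 최대값이 중복일 경우 더 큰 열인덱스를 반환해야 하므로, 등호를 삽입한다.
--             # 최대값이 중복일 경우 더 큰 열인덱스를 반환해야 한다면, 등호를 빼야한다.
--             if garden[j][i] >= expensive_tree:
--                 expensive_tree = garden[j][i]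
--                 # 인덱스는 0부터 시작인데, 출력은 1~M으로 해야해서 1을 더해준다
--                 expensive_tree_col = i + 1
--
--     # 2.3 모든 반복문이 종료된 후 4개의 출력값을 한줄로 묶어서 출력해야하기 때문에
--     # join을 쓰기 위해 각 요소를 int가 아닌 str로 만들기 위해 map을 사용한다.
--     return ' '.join(map(str, [tree_pay, tree_cnt, expensive_tree, expensive_tree_col]))
-- ===== SOURCE B (Python) =====
-- def gardening(N, M, garden):
--     # three independent passes: closed-form count, row-major sum, then a max scan over even columns
--     cols = list(range(0, M, 2))
--     rows = garden[:N]
--     tree_cnt = N * len(cols)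
--     tree_pay = sum(row[i] for row in rows for i in cols)
--     best = 0
--     best_col = 0
--     for i in cols:
--         for row in rows:
--             if row[i] >= best:
--                 best = row[i]
--                 best_col = i + 1
--     return ' '.join(map(str, [tree_pay, tree_cnt, best, best_col]))
-- ===== Notes on version B (the rewrite author's own statement) =====
-- stated objective: simpler
-- what changed: Replaces A's single fused loop carrying four accumulators by three independent passes: a closed-form count N*len(cols), one row-major generator sum for the total price, and a dedicated scan for the most expensive tree and its column; Pre_ requires 0 <= N (a negative row count is outside the natural domain) and, when both loops run, that garden has N rows each covering the largest even column (otherwise A raises IndexError).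
-- outside the precondition, e.g. on gardening(-1, 2, []): A returns '0 0 0 0', B returns '0 -1 0 0'
import Mathlib
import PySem

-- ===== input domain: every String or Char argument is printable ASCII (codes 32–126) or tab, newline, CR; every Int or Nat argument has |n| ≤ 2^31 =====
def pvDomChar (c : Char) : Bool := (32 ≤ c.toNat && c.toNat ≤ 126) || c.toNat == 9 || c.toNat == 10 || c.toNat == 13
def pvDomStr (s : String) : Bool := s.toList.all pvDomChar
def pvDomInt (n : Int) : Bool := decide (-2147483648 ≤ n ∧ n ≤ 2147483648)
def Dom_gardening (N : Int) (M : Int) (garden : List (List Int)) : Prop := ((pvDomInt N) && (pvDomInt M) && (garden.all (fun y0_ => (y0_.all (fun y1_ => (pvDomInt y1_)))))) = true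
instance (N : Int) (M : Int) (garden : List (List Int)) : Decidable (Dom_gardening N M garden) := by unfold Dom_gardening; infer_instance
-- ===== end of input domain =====

-- B computes the four outputs in independent passes (closed-form count, row-major sum, max scan) instead of A's fused loop (objective: simpler decomposition).

-- ===== PORT A =====
def gardening (N : Int) (M : Int) (garden : List (List Int)) : String :=
  let st := (PySem.List.pyRange 0 M 2).foldl (fun st i =>
      (PySem.List.pyRange 0 N).foldl (fun st j =>
        let v := PySem.List.pyGetD (PySem.List.pyGetD garden j []) i 0
        let pay := st.1 + v
        let cnt := st.2.1 + 1
        if st.2.2.1 ≤ v then (pay, cnt, v, i + 1) else (pay, cnt, st.2.2.1, st.2.2.2)) st)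
    ((0:Int), (0:Int), (0:Int), (0:Int))
  PySem.Str.join " " ([st.1, st.2.1, st.2.2.1, st.2.2.2].map PySem.Int.toStr)

-- ===== PORT B =====
def gardening_alt (N : Int) (M : Int) (garden : List (List Int)) : String :=
  let cols := PySem.List.pyRange 0 M 2
  let rows := PySem.List.slice garden none (some N)
  let cnt : Int := N * cols.length
  let pay : Int := (rows.flatMap (fun row => cols.map (fun i => PySem.List.pyGetD row i 0))).sum
  let bc := cols.foldl (fun bc i =>
      rows.foldl (fun bc row =>
        if bc.1 ≤ PySem.List.pyGetD row i 0 then (PySem.List.pyGetD row i 0, i + 1) else bc) bc)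
    ((0:Int), (0:Int))
  PySem.Str.join " " ([pay, cnt, bc.1, bc.2].map PySem.Int.toStr)

-- ===== PRECONDITION & SPEC =====
-- Pre_ requires 0 ≤ N (a negative row count is outside the task's natural domain; A's empty loops
-- there return "0 0 0 0" by accident) and, when both loops run, that garden has at least N rows
-- each covering the largest even column index < M — otherwise A raises IndexError.
def Pre_gardening (N : Int) (M : Int) (garden : List (List Int)) : Prop :=
  0 ≤ N ∧ (0 < N → 0 < M →
    N.toNat ≤ garden.length ∧
    ∀ row ∈ garden.take N.toNat, 2 * ((M.toNat - 1) / 2) < row.length)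
instance (N : Int) (M : Int) (garden : List (List Int)) : Decidable (Pre_gardening N M garden) := by unfold Pre_gardening; infer_instance
def pvWitness_gardening : Int × Int × List (List Int) := (2, 3, [[1,2,3],[4,5,6]])
def Spec_gardening (N : Int) (M : Int) (garden : List (List Int)) (out : String) : Prop := out = gardening_alt N M garden
instance (N : Int) (M : Int) (garden : List (List Int)) (out : String) : Decidable (Spec_gardening N M garden out) := by unfold Spec_gardening; infer_instance

-- ===== CLAIM (what is proved, stated in full; the proofs are below) =====
def Claim_equal_gardening : Prop := ∀ (N : Int) (M : Int) (garden : List (List Int)), Dom_gardening N M garden → Pre_gardening N M garden → Spec_gardening N M garden (gardening N M garden)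

-- ===== LEMMAS AND PROOFS =====

-- the cell accessed for row r and column i (same expression in both ports)
def pvCell (i : Int) (r : List Int) : Int := PySem.List.pyGetD r i 0

-- B's (best, column) scan as a named fold
def pvBC (rows : List (List Int)) (cs : List Int) (s : Int × Int) : Int × Int :=
  cs.foldl (fun s i =>
    rows.foldl (fun s r => if s.1 ≤ pvCell i r then (pvCell i r, i + 1) else s) s) s

-- A's inner row loop: pay/cnt in closed form, (best, col) as B's inner scan
theorem pv_inner_spec (rows : List (List Int)) (i : Int) (p c b l : Int) :
    rows.foldl (fun st r =>
        let v := PySem.List.pyGetD r i 0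
        let pay := st.1 + v
        let cnt := st.2.1 + 1
        if st.2.2.1 ≤ v then (pay, cnt, v, i + 1) else (pay, cnt, st.2.2.1, st.2.2.2))
      ((p, c, b, l) : Int × Int × Int × Int)
    = (p + (rows.map (pvCell i)).sum, c + rows.length,
       rows.foldl (fun s r => if s.1 ≤ pvCell i r then (pvCell i r, i + 1) else s) ((b, l) : Int × Int)) := by
  induction rows generalizing p c b l with
  | nil => simp
  | cons r rows ih =>
    rw [List.foldl_cons]
    show List.foldl _
      (if b ≤ pvCell i r then ((p + pvCell i r, c + 1, pvCell i r, i + 1) : Int × Int × Int × Int)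
       else (p + pvCell i r, c + 1, b, l)) rows = _
    by_cases hb : b ≤ pvCell i r
    · rw [if_pos hb, ih]
      simp only [List.map_cons, List.sum_cons, List.length_cons, List.foldl_cons, if_pos hb,
        Prod.mk.injEq]
      and_intros <;> first | trivial | (push_cast; ring)
    · rw [if_neg hb, ih]
      simp only [List.map_cons, List.sum_cons, List.length_cons, List.foldl_cons, if_neg hb,
        Prod.mk.injEq]
      and_intros <;> first | trivial | (push_cast; ring)

-- A's fused fold over the column list, decomposed into B's three components
theorem pv_fold_spec (rows : List (List Int)) (cs : List Int) (p c b l : Int) :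
    cs.foldl (fun st i =>
        rows.foldl (fun st r =>
          let v := PySem.List.pyGetD r i 0
          let pay := st.1 + v
          let cnt := st.2.1 + 1
          if st.2.2.1 ≤ v then (pay, cnt, v, i + 1) else (pay, cnt, st.2.2.1, st.2.2.2)) st)
      ((p, c, b, l) : Int × Int × Int × Int)
    = (p + (cs.map (fun i => (rows.map (pvCell i)).sum)).sum,
       c + cs.length * rows.length,
       pvBC rows cs (b, l)) := by
  induction cs generalizing p c b l with
  | nil => simp [pvBC]
  | cons i cs ih =>
    rw [List.foldl_cons, pv_inner_spec]
    set X := rows.foldl (fun s r => if s.1 ≤ pvCell i r then (pvCell i r, i + 1) else s) ((b, l) : Int × Int) with hX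
    have heta : (p + (rows.map (pvCell i)).sum, c + (rows.length : Int), X)
        = ((p + (rows.map (pvCell i)).sum, c + (rows.length : Int), X.1, X.2) : Int × Int × Int × Int) := rfl
    rw [heta, ih]
    have h3 : pvBC rows cs (X.1, X.2) = pvBC rows (i :: cs) (b, l) := rfl
    rw [h3]
    simp only [List.map_cons, List.sum_cons, List.length_cons, Prod.mk.injEq]
    and_intros <;> first | trivial | (push_cast; ring)

-- A's inner loop ranges over range(N) and indexes garden[j]: it is a fold over the first N rows
theorem pv_foldl_range_getD {β : Type} (garden : List (List Int)) (n : Nat)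
    (hn : n ≤ garden.length) (f : β → List Int → β) (init : β) :
    (List.range n).foldl (fun st k => f st (garden.getD k [])) init
    = (garden.take n).foldl f init := by
  induction n generalizing init with
  | zero => simp
  | succ m ih =>
    have hm : m < garden.length := by omega
    rw [List.range_succ, List.foldl_append, ih (by omega),
      List.take_add_one, List.foldl_append]
    simp [List.getElem?_eq_getElem hm]

theorem pv_range_fold {β : Type} (garden : List (List Int)) (N : Int)
    (hN : N.toNat ≤ garden.length) (f : β → List Int → β) (init : β) :
    (PySem.List.pyRange 0 N).foldl (fun st j => f st (PySem.List.pyGetD garden j [])) init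
    = (garden.take N.toNat).foldl f init := by
  rw [PySem.List.pyRange_one, List.foldl_map]
  simp only [Int.sub_zero]
  rw [PySem.List.foldl_congr_mem (List.range N.toNat) _
    (fun st k => f st (garden.getD k [])) init
    (fun st k _ => by simp [PySem.List.pyGetD_natCast])]
  exact pv_foldl_range_getD garden N.toNat hN f init

-- exchange of summation: column-major double sum equals row-major double sum
theorem pv_sum_comm (cs : List Int) (rs : List (List Int)) :
    (cs.map (fun i => (rs.map (fun r => pvCell i r)).sum)).sum
    = (rs.map (fun r => (cs.map (fun i => pvCell i r)).sum)).sum := by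
  induction cs with
  | nil => simp
  | cons i cs ih =>
    rw [List.map_cons, List.sum_cons, ih]
    have := PySem.List.sum_map_add_int rs (fun r => pvCell i r)
      (fun r => (cs.map (fun j => pvCell j r)).sum)
    simp only [List.map_cons, List.sum_cons]
    rw [this]

-- a row-major nested sum is the sum of the flattened cell list
theorem pv_sum_flatMap (rs : List (List Int)) (f : List Int → List Int) :
    (rs.flatMap f).sum = (rs.map (fun r => (f r).sum)).sum := by
  induction rs with
  | nil => rfl
  | cons r rs ih => simp [List.flatMap_cons, ih]

-- ===== VERDICT (by name: the statement is the Claim_ definition above) =====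
theorem gardening_spec : Claim_equal_gardening := by
  unfold Claim_equal_gardening Spec_gardening
  intro N M garden _ hpre
  obtain ⟨hN0, hpre⟩ := hpre
  by_cases hM : 0 < M
  · have hN : N.toNat ≤ garden.length := by
      by_cases hNp : 0 < N
      · exact (hpre hNp hM).1
      · omega
    simp only [gardening, gardening_alt]
    rw [PySem.List.foldl_congr_mem (PySem.List.pyRange 0 M 2) _
      (fun st i => (garden.take N.toNat).foldl (fun st r =>
        let v := PySem.List.pyGetD r i 0
        let pay := st.1 + v
        let cnt := st.2.1 + 1
        if st.2.2.1 ≤ v then (pay, cnt, v, i + 1) else (pay, cnt, st.2.2.1, st.2.2.2)) st) _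
      (fun acc i _ => pv_range_fold garden N hN _ acc)]
    rw [pv_fold_spec]
    rw [PySem.List.slice_to garden hN0]
    set rows := garden.take N.toNat with hrows
    set cols := PySem.List.pyRange 0 M 2 with hcols
    have hlen : ((rows.length : Int)) = N := by
      rw [hrows, List.length_take]
      omega
    have hpay : (cols.map (fun i => (rows.map (pvCell i)).sum)).sum
        = (rows.flatMap (fun row => cols.map (fun i => PySem.List.pyGetD row i 0))).sum := by
      rw [pv_sum_comm]
      exact (pv_sum_flatMap rows (fun row => cols.map (fun i => PySem.List.pyGetD row i 0))).symm
    have hcnt : ((cols.length : Int)) * rows.length = N * cols.length := by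
      rw [hlen]; ring
    rw [hpay, hcnt]
    simp only [pvBC, pvCell, zero_add]
  · have hcols : PySem.List.pyRange 0 M 2 = [] := by
      rw [PySem.List.pyRange_of_pos 0 M (by norm_num : (0:Int) < 2)]
      simp [hM]
    have hfm : ∀ (L : List (List Int)), L.flatMap (fun _ => ([] : List Int)) = [] := by
      intro L
      induction L with
      | nil => rfl
      | cons x xs ih => simp [ih]
    simp only [gardening, gardening_alt, hcols]
    simp [hfm]
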